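-- pv_equiv track=rewrite | github.com/pypi-data/pypi-mirror-372 | packages/phylim/phylim-2025.8.27-py3-none-any.whl/phylim/eval_identifiability.py | break_path
-- ===== SOURCE A (Python) =====
-- def break_path(path: list[str], msyms: set) -> list[set]:
--     """break the path by msyms(the set of sympathetics)"""
--     split_paths = []
--     linked = set()
--     for item in path:
--         if item in msyms:
--             if linked:
--                 linked = linked | {item}
--                 split_paths.append(linked)
--             linked = set()
--         else:
--             linked = linked | {item}
--     if len(linked) > 1:
--         split_paths.append(linked)
--
--     return split_paths
-- ===== SOURCE B (Python) =====
-- def break_path(path: list[str], msyms: set) -> list[set]: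
--     """break the path by msyms(the set of sympathetics)"""
--     out = []
--     n = len(path)
--     i = 0
--     while i < n:
--         if path[i] in msyms:
--             i += 1
--             continue
--         j = i
--         while j < n and path[j] not in msyms:
--             j += 1
--         run = set(path[i:j])
--         if j < n:
--             run.add(path[j])
--             out.append(run)
--         elif len(run) > 1:
--             out.append(run)
--         i = j + 1
--     return out
-- ===== Notes on version B (the rewrite author's own statement) =====
-- stated objective: alternative
-- what changed: Replaces A's flat accumulate-and-flush state machine (one set variable mutated per element) by run-segmentation: a nested index scan that grabs each maximal non-separator run at once, closes it with the separator that follows, and applies the len>1 rule only to an unclosed trailing run.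
import Mathlib
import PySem

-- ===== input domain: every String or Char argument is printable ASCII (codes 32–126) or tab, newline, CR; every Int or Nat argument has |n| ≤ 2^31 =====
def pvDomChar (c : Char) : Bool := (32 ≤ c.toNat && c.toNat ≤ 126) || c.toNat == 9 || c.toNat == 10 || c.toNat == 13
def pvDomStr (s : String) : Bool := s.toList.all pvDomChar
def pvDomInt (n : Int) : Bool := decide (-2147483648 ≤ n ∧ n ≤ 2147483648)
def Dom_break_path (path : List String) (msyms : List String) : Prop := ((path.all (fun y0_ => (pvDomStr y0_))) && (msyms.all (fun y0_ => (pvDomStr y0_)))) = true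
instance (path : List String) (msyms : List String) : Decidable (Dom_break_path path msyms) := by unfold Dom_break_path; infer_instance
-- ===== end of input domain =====

-- B re-decomposes A's flat accumulate-and-flush state machine as run-segmentation (scan each
-- maximal non-separator run at once); same cost, a different decomposition.

-- ===== PORT A =====
-- literal transliteration of A: one fold carrying (split_paths, linked)
def break_path (path : List String) (msyms : List String) : List (List String) :=
  let r := path.foldl (fun (st : List (List String) × List String) (item : String) =>
    if msyms.contains item then
      if !st.2.isEmpty then (st.1 ++ [PySem.Set.union st.2 [item]], PySem.Set.empty)
      else (st.1, PySem.Set.empty)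
    else (st.1, PySem.Set.union st.2 [item])) ([], PySem.Set.empty)
  if r.2.length > 1 then r.1 ++ [r.2] else r.1

-- ===== PORT B =====
-- transliteration of B: outer scan over runs; the inner `while j < n and path[j] not in msyms`
-- scan is takeWhile/dropWhile; run = set(path[i:j])
def break_path_alt (path : List String) (msyms : List String) : List (List String) :=
  match path with
  | [] => []
  | x :: rest =>
    if msyms.contains x then break_path_alt rest msyms
    else
      let run := PySem.Set.ofList (x :: rest.takeWhile (fun y => !(msyms.contains y)))
      match h : rest.dropWhile (fun y => !(msyms.contains y)) with
      | sep :: rest' => PySem.Set.add run sep :: break_path_alt rest' msyms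
      | [] => if run.length > 1 then [run] else []
  termination_by path.length
  decreasing_by
  all_goals
    first
    | (simp only [List.length_cons]; omega)
    | (have hle := (List.dropWhile_sublist (p := fun y => !(msyms.contains y)) (l := rest)).length_le
       rw [h] at hle
       simp at hle ⊢
       omega)

-- ===== PRECONDITION & SPEC =====
def Spec_break_path (path : List String) (msyms : List String) (out : List (List String)) : Prop := out = break_path_alt path msyms
instance (path : List String) (msyms : List String) (out : List (List String)) : Decidable (Spec_break_path path msyms out) := by unfold Spec_break_path; infer_instance

-- ===== CLAIM (what is proved, stated in full; the proofs are below) =====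
def Claim_equal_break_path : Prop := ∀ (path : List String) (msyms : List String), Dom_break_path path msyms → Spec_break_path path msyms (break_path path msyms)

-- ===== LEMMAS AND PROOFS =====

-- A's loop body, named (proof-only helper)
def stepA (msyms : List String) (st : List (List String) × List String) (item : String) :
    List (List String) × List String :=
  if msyms.contains item then
    if !st.2.isEmpty then (st.1 ++ [PySem.Set.union st.2 [item]], PySem.Set.empty)
    else (st.1, PySem.Set.empty)
  else (st.1, PySem.Set.union st.2 [item])

-- A's state machine, restructured as a recursion (proof-only helper)
def bp2 (msyms linked : List String) : List String → List (List String)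
  | [] => if linked.length > 1 then [linked] else []
  | x :: rest =>
    if msyms.contains x then
      if linked.isEmpty then bp2 msyms [] rest
      else PySem.Set.add linked x :: bp2 msyms [] rest
    else bp2 msyms (PySem.Set.add linked x) rest

theorem add_nil (x : String) : PySem.Set.add [] x = [x] := rfl

theorem break_path_eq_stepA (path msyms : List String) :
    break_path path msyms =
      (let r := path.foldl (stepA msyms) ([], PySem.Set.empty)
       if r.2.length > 1 then r.1 ++ [r.2] else r.1) := rfl

-- A's fold+final equals bp2
theorem A_eq_bp2 (msyms : List String) (path : List String) :
    ∀ (acc : List (List String)) (linked : List String),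
    (let r := path.foldl (stepA msyms) (acc, linked)
     if r.2.length > 1 then r.1 ++ [r.2] else r.1)
    = acc ++ bp2 msyms linked path := by
  induction path with
  | nil =>
    intro acc linked
    simp only [List.foldl_nil, bp2]
    split <;> simp
  | cons x rest ih =>
    intro acc linked
    simp only [List.foldl_cons, bp2]
    by_cases hx : msyms.contains x
    · have hx' : x ∈ msyms := by simpa using hx
      by_cases hl : linked.isEmpty = true
      · have hstep : stepA msyms (acc, linked) x = (acc, PySem.Set.empty) := by
          simp [stepA, hx', hl]
        rw [hstep, ih acc PySem.Set.empty]
        simp [hx', hl, PySem.Set.empty]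
      · have hstep : stepA msyms (acc, linked) x
            = (acc ++ [PySem.Set.union linked [x]], PySem.Set.empty) := by
          simp [stepA, hx', hl]
        rw [hstep, ih _ PySem.Set.empty]
        have hadd : PySem.Set.union linked [x] = PySem.Set.add linked x := rfl
        simp [hx', hl, PySem.Set.empty, hadd]
    · have hx' : x ∉ msyms := by simpa using hx
      have hstep : stepA msyms (acc, linked) x = (acc, PySem.Set.union linked [x]) := by
        simp [stepA, hx']
      rw [hstep, ih acc (PySem.Set.union linked [x])]
      have hadd : PySem.Set.union linked [x] = PySem.Set.add linked x := rfl
      simp [hx', hadd]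

-- flushing a nonempty pending run: bp2 consumes the whole maximal non-separator run at once
theorem bp2_flush (msyms : List String) (rest : List String) :
    ∀ linked : List String, linked ≠ [] →
    bp2 msyms linked rest =
      (match rest.dropWhile (fun y => !(msyms.contains y)) with
       | sep :: rest' =>
           PySem.Set.add
             (List.foldl PySem.Set.add linked (rest.takeWhile (fun y => !(msyms.contains y)))) sep
             :: bp2 msyms [] rest'
       | [] =>
           if (List.foldl PySem.Set.add linked
                 (rest.takeWhile (fun y => !(msyms.contains y)))).length > 1 then
             [List.foldl PySem.Set.add linked (rest.takeWhile (fun y => !(msyms.contains y)))]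
           else []) := by
  induction rest with
  | nil => intro linked _; simp [bp2]
  | cons y rest ih =>
    intro linked hne
    by_cases hy : msyms.contains y
    · simp only [bp2, hy, if_true, List.isEmpty_iff, hne, if_false,
        List.takeWhile_cons, List.dropWhile_cons, Bool.not_true, Bool.false_eq_true,
        List.foldl_nil]
    · simp only [bp2, hy, if_false, Bool.false_eq_true,
        List.takeWhile_cons, List.dropWhile_cons, Bool.not_false, if_true,
        List.foldl_cons]
      exact ih (PySem.Set.add linked y)
        (by unfold PySem.Set.add; split <;> simp_all)

theorem length_dropWhile_le' (p : String → Bool) (l : List String) :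
    (l.dropWhile p).length ≤ l.length :=
  (List.dropWhile_sublist (p := p) (l := l)).length_le

-- bp2 from the empty pending set is exactly B
theorem bp2_eq_alt : ∀ (n : Nat) (path msyms : List String), path.length ≤ n →
    bp2 msyms [] path = break_path_alt path msyms := by
  intro n
  induction n with
  | zero =>
    intro path msyms hlen
    have hnil : path = [] := by
      cases path with
      | nil => rfl
      | cons a b => simp at hlen
    subst hnil
    simp [bp2, break_path_alt]
  | succ n ihn =>
    intro path msyms hlen
    cases path with
    | nil => simp [bp2, break_path_alt]
    | cons x rest =>
      rw [break_path_alt]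
      by_cases hx : msyms.contains x
      · simp only [bp2, hx, if_true, List.isEmpty_nil]
        exact ihn rest msyms (by simp at hlen; omega)
      · simp only [bp2, hx, if_false, Bool.false_eq_true, add_nil]
        rw [bp2_flush msyms rest [x] (by simp)]
        simp only [PySem.Set.ofList_eq_foldl, List.foldl_cons, add_nil]
        split
        · next sep rest' heq =>
          rw [heq]
          have hr : rest'.length ≤ n := by
            have hd := length_dropWhile_le' (fun y => !(msyms.contains y)) rest
            rw [heq] at hd
            simp at hd hlen
            omega
          rw [ihn rest' msyms hr]
        · next heq =>
          rw [heq]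

-- ===== VERDICT (by name: the statement is the Claim_ definition above) =====
theorem break_path_spec : Claim_equal_break_path := by
  intro path msyms _
  unfold Spec_break_path
  rw [break_path_eq_stepA, A_eq_bp2 msyms path [] PySem.Set.empty]
  simpa [PySem.Set.empty] using bp2_eq_alt path.length path msyms le_rfl
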